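-- pv_equiv track=rewrite | github.com/nresare/aoc | aoc2020/day3/day3.py | gen_values
-- ===== SOURCE A (Python) =====
-- from typing import Iterator
--
-- def gen_values(matrix: [tuple, [tuple[bool, ...], ...]], line_length: int, path: tuple[int, int]) -> Iterator[bool]:
--     right, down = path
--     x = 0
--     y = 0
--     for y in range(0, len(matrix), down):
--         value = matrix[y][x % line_length]
--         yield value
--         x += right
-- ===== SOURCE B (Python) =====
-- def gen_values(matrix, line_length, path):
--     right, down = path
--     if down <= 0:
--         # range(0, len(matrix), down) is empty for negative down (and the
--         # generator yields nothing); down == 0 is a ValueError in A and is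
--         # outside the stated precondition.
--         return
--     x = 0
--     rows = matrix
--     while rows:
--         yield rows[0][x % line_length]
--         rows = rows[down:]
--         x += right
-- ===== Notes on version B (the rewrite author's own statement) =====
-- stated objective: alternative
-- what changed: Instead of an index loop over range(0, len(matrix), down) that subscripts the fixed matrix by row number, B consumes the list itself: a while loop (structural recursion in the port) that always reads the head row rows[0] and advances by slicing rows = rows[down:], so no row index exists at all.
import Mathlib
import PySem

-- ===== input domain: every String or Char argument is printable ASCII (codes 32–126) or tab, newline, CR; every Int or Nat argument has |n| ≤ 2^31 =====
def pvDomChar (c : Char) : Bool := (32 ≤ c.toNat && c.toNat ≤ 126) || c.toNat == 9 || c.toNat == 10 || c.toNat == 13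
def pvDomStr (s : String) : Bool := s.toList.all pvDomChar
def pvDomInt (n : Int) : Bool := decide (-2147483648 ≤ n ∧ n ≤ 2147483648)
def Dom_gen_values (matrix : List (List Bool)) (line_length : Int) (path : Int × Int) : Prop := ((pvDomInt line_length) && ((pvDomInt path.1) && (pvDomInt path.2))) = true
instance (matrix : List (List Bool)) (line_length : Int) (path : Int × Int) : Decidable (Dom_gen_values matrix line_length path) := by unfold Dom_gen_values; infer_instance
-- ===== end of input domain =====

-- B replaces A's index loop over range(0, len(matrix), down) by a list-consuming
-- traversal: read the head row, then slice rows = rows[down:] (objective: alternative,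
-- no row index at all). A is a generator; equivalence is about the yielded values.

-- ===== PORT A =====
-- x = 0; for y in range(0, len(matrix), down): value = matrix[y][x % line_length]; yield value; x += right
def gen_values (matrix : List (List Bool)) (line_length : Int) (path : Int × Int) : List Bool :=
  let right := path.1
  let down := path.2
  ((PySem.List.pyRange 0 (matrix.length : Int) down).foldl
    (fun (st : List Bool × Int) y =>
      let value := PySem.List.pyGetD (PySem.List.pyGetD matrix y [])
        (PySem.Int.mod st.2 line_length) false
      (st.1 ++ [value], st.2 + right))
    ([], 0)).1

-- ===== PORT B =====
-- while rows: yield rows[0][x % line_length]; rows = rows[down:]; x += right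
-- (d = down.toNat ≥ 1 on every admitted input with down > 0; for rows = r :: rest,
--  rows[down:] = rest.drop (d-1), which is how the slice is transcribed.)
def gen_values_altGo (d : Nat) (right line_length : Int) :
    List (List Bool) → Int → List Bool
  | [], _ => []
  | r :: rest, x =>
    (PySem.List.pyGetD r (PySem.Int.mod x line_length) false)
      :: gen_values_altGo d right line_length (rest.drop (d - 1)) (x + right)
termination_by rows _ => rows.length
decreasing_by simp [List.length_drop]

def gen_values_alt (matrix : List (List Bool)) (line_length : Int) (path : Int × Int) : List Bool :=
  if path.2 ≤ 0 then []
  else gen_values_altGo path.2.toNat path.1 line_length matrix 0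

-- ===== PRECONDITION & SPEC =====
-- Exactly where the Python A returns: down ≠ 0 (range raises ValueError on step 0) and, at every
-- visited step, line_length ≠ 0 (ZeroDivisionError) and the wrapped column index is inside the row
-- (IndexError otherwise).
def Pre_gen_values (matrix : List (List Bool)) (line_length : Int) (path : Int × Int) : Prop :=
  path.2 ≠ 0 ∧
  ∀ p ∈ PySem.List.enumerate (PySem.List.pyRange 0 (matrix.length : Int) path.2) 0,
    line_length ≠ 0 ∧
    PySem.Raise.InRange ((PySem.List.pyGet? matrix p.2).getD []).length
      (PySem.Int.mod (p.1 * path.1) line_length)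
instance (matrix : List (List Bool)) (line_length : Int) (path : Int × Int) : Decidable (Pre_gen_values matrix line_length path) := by unfold Pre_gen_values; infer_instance

def pvWitness_gen_values : List (List Bool) × Int × (Int × Int) :=
  ([[true, false], [false, true]], 2, (3, 1))

def Spec_gen_values (matrix : List (List Bool)) (line_length : Int) (path : Int × Int) (out : List Bool) : Prop := out = gen_values_alt matrix line_length path
instance (matrix : List (List Bool)) (line_length : Int) (path : Int × Int) (out : List Bool) : Decidable (Spec_gen_values matrix line_length path out) := by unfold Spec_gen_values; infer_instance

-- ===== CLAIM (what is proved, stated in full; the proofs are below) =====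
def Claim_equal_gen_values : Prop := ∀ (matrix : List (List Bool)) (line_length : Int) (path : Int × Int), Dom_gen_values matrix line_length path → Pre_gen_values matrix line_length path → Spec_gen_values matrix line_length path (gen_values matrix line_length path)

-- ===== LEMMAS AND PROOFS =====

-- range(0, n, d) is empty for a negative step and nonnegative n.
lemma pyRange_zero_nonpos_step (n s : Int) (hn : 0 ≤ n) (hs : s < 0) :
    PySem.List.pyRange 0 n s = [] := by
  simp only [PySem.List.pyRange]
  rw [if_neg (by omega)]
  rw [if_neg (by omega), if_neg (by omega)]
  simp

-- Peel one element off a positive-step range starting at 0: the rest is the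
-- range for n - d, shifted by d.
lemma pyRange_pos_cons (n : Int) (d : Nat) (hn : 1 ≤ n) (hd : 1 ≤ d) :
    PySem.List.pyRange 0 n (d : Int)
      = 0 :: (PySem.List.pyRange 0 (n - d) (d : Int)).map (· + (d : Int)) := by
  have hd0 : (0 : Int) < (d : Int) := by exact_mod_cast hd
  rw [PySem.List.pyRange_of_pos 0 n hd0, PySem.List.pyRange_of_pos 0 (n - d) hd0]
  have hcount : (if (0:Int) < n then ((n - 0 + d - 1) / d).toNat else 0)
      = (if (0:Int) < n - d then ((n - d - 0 + d - 1) / d).toNat else 0) + 1 := by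
    rw [if_pos (by omega)]
    by_cases h : (0:Int) < n - d
    · rw [if_pos h]
      have e1 : n - 0 + d - 1 = (n - d - 0 + d - 1) + 1 * d := by ring
      rw [e1, Int.add_mul_ediv_right _ _ (by omega : (d:Int) ≠ 0)]
      have hpos : 0 ≤ (n - d - 0 + d - 1) / d := by
        apply Int.ediv_nonneg <;> omega
      omega
    · rw [if_neg h]
      have e1 : n - 0 + d - 1 = (n - 1) + 1 * d := by ring
      have hz : (n - 1) / d = 0 := Int.ediv_eq_zero_of_lt (by omega) (by omega)
      rw [e1, Int.add_mul_ediv_right _ _ (by omega : (d:Int) ≠ 0), hz]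
      simp
  rw [hcount, List.range_succ_eq_map, List.map_cons, List.map_map, List.map_map]
  refine List.cons_eq_cons.mpr ⟨by ring, ?_⟩
  apply List.map_congr_left
  intro k _
  simp only [Function.comp]
  push_cast
  ring

-- range(0, m, d) is empty for m ≤ 0 and positive step d.
lemma pyRange_pos_nil (m : Int) (d : Nat) (hm : m ≤ 0) (hd : 1 ≤ d) :
    PySem.List.pyRange 0 m (d : Int) = [] := by
  rw [PySem.List.pyRange_of_pos 0 m (by exact_mod_cast hd)]
  rw [if_neg (by omega)]
  simp

-- shift a nonnegative python index past a dropped prefix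
lemma pyGetD_add_drop (rows : List (List Bool)) (y : Int) (d : Nat) (hy : 0 ≤ y)
    (e : List Bool) :
    PySem.List.pyGetD rows (y + d) e = PySem.List.pyGetD (rows.drop d) y e := by
  have h1 : PySem.List.pyGetD rows (y + d) e
      = PySem.List.pyGetD rows ((y.toNat + d : Nat) : Int) e := by
    congr 1; omega
  have h2 : PySem.List.pyGetD (rows.drop d) y e
      = PySem.List.pyGetD (rows.drop d) ((y.toNat : Nat) : Int) e := by
    congr 1; omega
  rw [h1, h2, PySem.List.pyGetD_natCast, PySem.List.pyGetD_natCast]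
  simp [List.getD_eq_getElem?_getD, List.getElem?_drop, Nat.add_comm]

-- A's index-loop fold over range(0, len(rows), d) equals B's list-consuming recursion.
lemma gen_values_key (d : Nat) (hd : 1 ≤ d) (right ll : Int) :
    ∀ (N : Nat) (rows : List (List Bool)), rows.length ≤ N → ∀ (acc : List Bool) (x : Int),
      ((PySem.List.pyRange 0 (rows.length : Int) (d : Int)).foldl
        (fun (st : List Bool × Int) y =>
          (st.1 ++ [PySem.List.pyGetD (PySem.List.pyGetD rows y [])
              (PySem.Int.mod st.2 ll) false], st.2 + right))
        (acc, x)).1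
      = acc ++ gen_values_altGo d right ll rows x := by
  intro N
  induction N with
  | zero =>
    intro rows h acc x
    have hr : rows = [] := List.length_eq_zero_iff.mp (Nat.le_zero.mp h)
    subst hr
    simp only [List.length_nil, Nat.cast_zero]
    rw [pyRange_pos_nil 0 d le_rfl hd]
    simp [gen_values_altGo]
  | succ N ih =>
    intro rows h acc x
    cases rows with
    | nil =>
      simp only [List.length_nil, Nat.cast_zero]
      rw [pyRange_pos_nil 0 d le_rfl hd]
      simp [gen_values_altGo]
    | cons r rest =>
      rw [pyRange_pos_cons ((r :: rest).length : Int) d (by simp only [List.length_cons]; omega) hd]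
      rw [List.foldl_cons, List.foldl_map]
      have hhead : PySem.List.pyGetD (r :: rest) (0 : Int) [] = r := by
        have : ((0 : Nat) : Int) = (0 : Int) := rfl
        rw [← this, PySem.List.pyGetD_natCast]; rfl
      rw [hhead]
      have hcongr : ∀ (st : List Bool × Int) y,
          y ∈ PySem.List.pyRange 0 (((r :: rest).length : Int) - d) (d : Int) →
          (st.1 ++ [PySem.List.pyGetD (PySem.List.pyGetD (r :: rest) (y + d) [])
              (PySem.Int.mod st.2 ll) false], st.2 + right)
          = (st.1 ++ [PySem.List.pyGetD (PySem.List.pyGetD ((r :: rest).drop d) y [])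
              (PySem.Int.mod st.2 ll) false], st.2 + right) := by
        intro st y hy
        have hy0 : 0 ≤ y := by
          have := (PySem.List.mem_pyRange_iff_of_pos
            (by exact_mod_cast hd : (0:Int) < (d:Int)) y).mp hy
          omega
        rw [pyGetD_add_drop _ _ _ hy0]
      rw [PySem.List.foldl_congr_mem _ _ _ _ hcongr]
      have hlen : ((r :: rest).length : Int) - d = (((r :: rest).drop d).length : Int) ∨
          (((r :: rest).length : Int) - d ≤ 0 ∧ (((r :: rest).drop d).length = 0)) := by
        simp [List.length_drop]; omega
      have hrange : PySem.List.pyRange 0 (((r :: rest).length : Int) - d) (d : Int)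
          = PySem.List.pyRange 0 ((((r :: rest).drop d).length : Int)) (d : Int) := by
        rcases hlen with h1 | ⟨h1, h2⟩
        · rw [h1]
        · rw [pyRange_pos_nil _ d h1 hd, h2]
          norm_num [pyRange_pos_nil 0 d le_rfl hd]
      rw [hrange]
      rw [ih ((r :: rest).drop d) (by simp only [List.length_drop, List.length_cons] at h ⊢; omega)]
      have hdrop : (r :: rest).drop d = rest.drop (d - 1) := by
        obtain ⟨k, rfl⟩ : ∃ k, d = k + 1 := ⟨d - 1, by omega⟩
        simp [List.drop_succ_cons]
      rw [hdrop]
      rw [gen_values_altGo]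
      simp

-- ===== VERDICT =====
theorem gen_values_spec : Claim_equal_gen_values := by
  intro matrix line_length path _ hpre
  unfold Spec_gen_values gen_values gen_values_alt
  dsimp only
  rcases hpre with ⟨hdz, -⟩
  by_cases hdn : path.2 ≤ 0
  · rw [if_pos hdn]
    rw [pyRange_zero_nonpos_step (matrix.length : Int) path.2 (by positivity) (by omega)]
    rfl
  · rw [if_neg hdn]
    have hd1 : 1 ≤ path.2.toNat := by omega
    have hcast : ((path.2.toNat : Nat) : Int) = path.2 := by omega
    have := gen_values_key path.2.toNat hd1 path.1 line_length matrix.length matrix le_rfl [] 0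
    rw [hcast] at this
    simpa using this
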